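-- pv_equiv track=rewrite | github.com/compbiogroup/rev-indels-distance-with-intergenic-regions | rev_indel_intergenic.py | construct_black_edges
-- ===== SOURCE A (Python) =====
-- def construct_black_edges(input_string, input_black) :
--     wblack = []
--     input_string_numbers = []
--     interblack = []
--     for i in range(0,len(input_string)) :
--         num = input_string[i]
--         interblack.append(input_black[i])
--         if num != 0 :
--             input_string_numbers.append(num)
--             wblack.append(interblack)
--             interblack = []
--
--     i = len(input_string)
--     while i < len(input_black) :
--         interblack.append(input_black[i])
--         i += 1
--     if len(interblack) > 0 :
--         wblack.append(interblack)
--     return(wblack, input_string_numbers)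
-- ===== SOURCE B (Python) =====
-- def construct_black_edges(input_string, input_black):
--     boundaries = [i for i in range(len(input_string)) if input_string[i] != 0]
--     wblack = []
--     prev = -1
--     for j in boundaries:
--         wblack.append(input_black[prev + 1 : j + 1])
--         prev = j
--     tail = input_black[prev + 1 : len(input_black)]
--     if tail:
--         wblack.append(tail)
--     return (wblack, [input_string[j] for j in boundaries])
-- ===== Notes on version B (the rewrite author's own statement) =====
-- stated objective: simpler
-- what changed: B first computes the list of nonzero boundary indices, then builds each group as one slice input_black[prev+1:j+1] and the trailing slice, instead of A's element-by-element accumulator loop plus a separate while loop over the leftover black elements.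
import Mathlib
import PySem

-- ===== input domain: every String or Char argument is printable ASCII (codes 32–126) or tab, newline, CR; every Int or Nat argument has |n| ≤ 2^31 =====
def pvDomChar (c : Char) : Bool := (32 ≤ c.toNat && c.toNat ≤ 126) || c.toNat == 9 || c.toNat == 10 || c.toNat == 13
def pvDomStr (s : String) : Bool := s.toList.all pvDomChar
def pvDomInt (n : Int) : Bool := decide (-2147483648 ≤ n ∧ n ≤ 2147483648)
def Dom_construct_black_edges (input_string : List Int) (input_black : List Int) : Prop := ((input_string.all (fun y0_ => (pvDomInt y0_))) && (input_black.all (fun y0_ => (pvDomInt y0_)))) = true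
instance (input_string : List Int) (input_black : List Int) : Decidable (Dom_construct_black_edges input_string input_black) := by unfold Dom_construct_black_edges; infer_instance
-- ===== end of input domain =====

-- B replaces A's element-by-element accumulator loop (plus trailing while loop) by
-- boundary indices and one clamped slice per group: a simpler decomposition, same cost.


-- ===== PORT A =====
-- for i in range(len(input_string)): input_string[i] is always in range; input_black[i]
-- is in range exactly under Pre_, and the while loop's index is always in range, so
-- pyGetD is exact on the admitted inputs.
def construct_black_edges (input_string : List Int) (input_black : List Int) : List (List Int) × List Int :=
  let st := (PySem.List.pyRange 0 (input_string.length : Int) 1).foldl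
    (fun (st : List (List Int) × List Int × List Int) i =>
      if PySem.List.pyGetD input_string i 0 ≠ 0 then
        (st.1 ++ [st.2.2 ++ [PySem.List.pyGetD input_black i 0]],
         st.2.1 ++ [PySem.List.pyGetD input_string i 0], ([] : List Int))
      else (st.1, st.2.1, st.2.2 ++ [PySem.List.pyGetD input_black i 0]))
    ([], [], [])
  let inter := (PySem.List.pyRange (input_string.length : Int) (input_black.length : Int) 1).foldl
    (fun acc i => acc ++ [PySem.List.pyGetD input_black i 0]) st.2.2
  if inter.length > 0 then (st.1 ++ [inter], st.2.1) else (st.1, st.2.1)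

-- ===== PORT B =====
def construct_black_edges_alt (input_string : List Int) (input_black : List Int) : List (List Int) × List Int :=
  let boundaries := (PySem.List.pyRange 0 (input_string.length : Int) 1).filter
    (fun i => PySem.List.pyGetD input_string i 0 ≠ 0)
  let p := boundaries.foldl
    (fun (p : List (List Int) × Int) j =>
      (p.1 ++ [PySem.List.slice input_black (some (p.2 + 1)) (some (j + 1))], j))
    ([], -1)
  let tail := PySem.List.slice input_black (some (p.2 + 1)) (some (input_black.length : Int))
  let wblack := if tail ≠ [] then p.1 ++ [tail] else p.1
  (wblack, boundaries.map (fun j => PySem.List.pyGetD input_string j 0))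

-- ===== PRECONDITION & SPEC =====
-- A indexes input_black at every index of input_string, so it raises IndexError exactly
-- when input_black is shorter than input_string; those inputs are excluded.
def Pre_construct_black_edges (input_string : List Int) (input_black : List Int) : Prop :=
  input_string.length ≤ input_black.length
instance (input_string : List Int) (input_black : List Int) : Decidable (Pre_construct_black_edges input_string input_black) := by unfold Pre_construct_black_edges; infer_instance

def pvWitness_construct_black_edges : List Int × List Int := ([1, 0, 2, 0], [10, 20, 30, 40, 50])


def Spec_construct_black_edges (input_string : List Int) (input_black : List Int) (out : List (List Int) × List Int) : Prop := out = construct_black_edges_alt input_string input_black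
instance (input_string : List Int) (input_black : List Int) (out : List (List Int) × List Int) : Decidable (Spec_construct_black_edges input_string input_black out) := by unfold Spec_construct_black_edges; infer_instance

-- ===== CLAIM (what is proved, stated in full; the proofs are below) =====
def Claim_equal_construct_black_edges : Prop := ∀ (input_string : List Int) (input_black : List Int), Dom_construct_black_edges input_string input_black → Pre_construct_black_edges input_string input_black → Spec_construct_black_edges input_string input_black (construct_black_edges input_string input_black)


-- ===== LEMMAS AND PROOFS =====

-- Common specification: structural recursion over the zipped (string, black) pairs,
-- carrying the open group `inter`; returns (closed groups, numbers, leftover group).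
def go2 : List (Int × Int) → List Int → List (List Int) × List Int × List Int
  | [], inter => ([], [], inter)
  | (num, x) :: rest, inter =>
    if num ≠ 0 then
      ((inter ++ [x]) :: (go2 rest []).1, num :: (go2 rest []).2.1, (go2 rest []).2.2)
    else go2 rest (inter ++ [x])

-- Assembling the final answer from go2's result and the surplus black elements.
def assemble (r : List (List Int) × List Int × List Int) (extra : List Int) :
    List (List Int) × List Int :=
  if (r.2.2 ++ extra).length > 0 then (r.1 ++ [r.2.2 ++ extra], r.2.1) else (r.1, r.2.1)

-- A's loop body as a function of the zipped pair.
def stepA (st : List (List Int) × List Int × List Int) (p : Int × Int) :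
    List (List Int) × List Int × List Int :=
  if p.1 ≠ 0 then (st.1 ++ [st.2.2 ++ [p.2]], st.2.1 ++ [p.1], ([] : List Int))
  else (st.1, st.2.1, st.2.2 ++ [p.2])

-- An index loop over range(k, len S) reading S[i] and B[i] is a fold over the zipped drops.
theorem foldl_zip_idx {σ : Type} (f : σ → Int → Int → σ) (S B : List Int)
    (hlen : S.length ≤ B.length) :
    ∀ (j k : ℕ), S.length - k = j → ∀ (init : σ),
    (PySem.List.pyRange (k : Int) (S.length : Int) 1).foldl
        (fun st i => f st (PySem.List.pyGetD S i 0) (PySem.List.pyGetD B i 0)) init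
      = ((S.drop k).zip (B.drop k)).foldl (fun st p => f st p.1 p.2) init := by
  intro j
  induction j with
  | zero =>
    intro k hk init
    rw [PySem.List.pyRange_one_eq_nil (by omega), List.drop_eq_nil_of_le (by omega)]
    simp
  | succ j ih =>
    intro k hk init
    have hkS : k < S.length := by omega
    have hkB : k < B.length := by omega
    rw [PySem.List.pyRange_one_cons (by exact_mod_cast hkS)]
    rw [List.drop_eq_getElem_cons hkS, List.drop_eq_getElem_cons hkB]
    simp only [List.foldl_cons, List.zip_cons_cons]
    rw [show ((k : Int) + 1) = ((k + 1 : ℕ) : Int) by push_cast; ring]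
    rw [ih (k + 1) (by omega)]
    simp [List.getElem?_eq_getElem hkS, List.getElem?_eq_getElem hkB]

theorem foldl_stepA_go2 : ∀ (ps : List (Int × Int)) (wb : List (List Int)) (nums inter : List Int),
    ps.foldl stepA (wb, nums, inter)
      = (wb ++ (go2 ps inter).1, nums ++ (go2 ps inter).2.1, (go2 ps inter).2.2) := by
  intro ps
  induction ps with
  | nil => intro wb nums inter; simp [go2]
  | cons p rest ih =>
    intro wb nums inter
    obtain ⟨num, x⟩ := p
    by_cases h : num = 0
    · simp [stepA, go2, h, ih]
    · simp [stepA, go2, h, ih]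

-- Splicing: the tail slice splits at any n between its start and len B.
theorem slice_take_drop (B : List Int) (q : Int) (n : ℕ) (hq : 0 ≤ q + 1)
    (hqn : q + 1 ≤ (n : Int)) :
    PySem.List.slice B (some (q + 1)) (some (n : Int)) ++ B.drop n
      = PySem.List.slice B (some (q + 1)) (some (B.length : Int)) := by
  rw [PySem.List.slice_toNat B hq (by omega), PySem.List.slice_toNat B hq (by omega)]
  have h1 : (B.drop (q + 1).toNat).take ((B.length : Int).toNat - (q + 1).toNat)
      = B.drop (q + 1).toNat := by
    apply List.take_of_length_le; simp
  rw [h1]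
  conv_rhs => rw [← List.take_append_drop ((n : Int).toNat - (q + 1).toNat) (B.drop (q + 1).toNat)]
  rw [List.drop_drop]
  congr 2
  omega

-- Extending a slice by one in-range element.
theorem slice_snoc (B : List Int) (q : Int) (k : ℕ) (hq : 0 ≤ q + 1)
    (hqk : q + 1 ≤ (k : Int)) (hk : k < B.length) :
    PySem.List.slice B (some (q + 1)) (some ((k : Int) + 1))
      = PySem.List.slice B (some (q + 1)) (some (k : Int)) ++ [B[k]] := by
  rw [PySem.List.slice_toNat B hq (by omega), PySem.List.slice_toNat B hq (by omega)]
  have h1 : ((k : Int) + 1).toNat - (q + 1).toNat = ((k : Int).toNat - (q + 1).toNat) + 1 := by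
    omega
  rw [h1, List.take_add_one]
  congr 1
  have h2 : (k : Int).toNat - (q + 1).toNat < (B.drop (q + 1).toNat).length := by simp; omega
  rw [List.getElem?_eq_getElem h2]
  simp only [List.getElem_drop, Option.toList_some]
  congr 2
  omega

-- B's boundary fold vs go2 of the zipped drops: at offset k with previous boundary q
-- (groups already emitted up to index q), the remaining fold produces go2's remaining
-- groups, the final tail slice is go2's leftover plus the surplus black elements, and
-- the boundary values are go2's numbers.
theorem genB (S B : List Int) (hlen : S.length ≤ B.length) :
    ∀ (j k : ℕ), S.length - k = j → k ≤ S.length → ∀ (wb : List (List Int)) (q : Int),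
    0 ≤ q + 1 → q + 1 ≤ (k : Int) →
    (let bs := (PySem.List.pyRange (k : Int) (S.length : Int) 1).filter
        (fun i => PySem.List.pyGetD S i 0 ≠ 0);
     let r := go2 ((S.drop k).zip (B.drop k)) (PySem.List.slice B (some (q + 1)) (some (k : Int)));
     let res := bs.foldl
        (fun (p : List (List Int) × Int) j =>
          (p.1 ++ [PySem.List.slice B (some (p.2 + 1)) (some (j + 1))], j)) (wb, q);
     res.1 = wb ++ r.1 ∧
       PySem.List.slice B (some (res.2 + 1)) (some (B.length : Int)) = r.2.2 ++ B.drop S.length ∧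
       bs.map (fun i => PySem.List.pyGetD S i 0) = r.2.1) := by
  intro j
  induction j with
  | zero =>
    intro k hj hkS wb q hq hqk
    have hk : k = S.length := by omega
    simp only
    rw [PySem.List.pyRange_one_eq_nil (by omega)]
    subst hk
    rw [List.drop_eq_nil_of_le (le_refl _)]
    simp only [List.zip_nil_left, go2, List.filter_nil, List.foldl_nil, List.map_nil]
    refine ⟨by simp, ?_, by simp⟩
    exact (slice_take_drop B q S.length hq hqk).symm
  | succ j ih =>
    intro k hj hkS wb q hq hqk
    have hkS' : k < S.length := by omega
    have hkB : k < B.length := by omega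
    simp only
    rw [PySem.List.pyRange_one_cons (by exact_mod_cast hkS')]
    rw [List.drop_eq_getElem_cons hkS', List.drop_eq_getElem_cons hkB]
    have hget : PySem.List.pyGetD S (k : Int) 0 = S[k] := by
      simp [List.getElem?_eq_getElem hkS']
    have hsucc : ((k : Int) + 1) = ((k + 1 : ℕ) : Int) := by push_cast; ring
    rw [List.zip_cons_cons]
    by_cases h : S[k] = 0
    · -- zero at k: no boundary; the black element joins the running slice
      rw [List.filter_cons_of_neg (by simp [hget, h])]
      have hrec := ih (k + 1) (by omega) (by omega) wb q hq (by omega)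
      simp only at hrec
      rw [← hsucc] at hrec
      rw [show go2 ((S[k], B[k]) :: (S.drop (k + 1)).zip (B.drop (k + 1)))
              (PySem.List.slice B (some (q + 1)) (some (k : Int)))
            = go2 ((S.drop (k + 1)).zip (B.drop (k + 1)))
              (PySem.List.slice B (some (q + 1)) (some (k : Int)) ++ [B[k]]) by
        simp [go2, h]]
      rw [← slice_snoc B q k hq hqk hkB]
      exact hrec
    · -- boundary at k: close the group with one slice, restart right after k
      rw [List.filter_cons_of_pos (by simp [hget, h])]
      simp only [List.foldl_cons, List.map_cons]
      have hrec := ih (k + 1) (by omega) (by omega)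
        (wb ++ [PySem.List.slice B (some (q + 1)) (some ((k : Int) + 1))]) (k : Int)
        (by omega) (by omega)
      simp only at hrec
      rw [← hsucc] at hrec
      rw [show PySem.List.slice B (some ((k : Int) + 1)) (some ((k : Int) + 1)) = [] by
        rw [PySem.List.slice_toNat B (by omega) (by omega)]; simp] at hrec
      obtain ⟨h1, h2, h3⟩ := hrec
      rw [show go2 ((S[k], B[k]) :: (S.drop (k + 1)).zip (B.drop (k + 1)))
              (PySem.List.slice B (some (q + 1)) (some (k : Int)))
            = ((PySem.List.slice B (some (q + 1)) (some (k : Int)) ++ [B[k]])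
                :: (go2 ((S.drop (k + 1)).zip (B.drop (k + 1))) []).1,
               S[k] :: (go2 ((S.drop (k + 1)).zip (B.drop (k + 1))) []).2.1,
               (go2 ((S.drop (k + 1)).zip (B.drop (k + 1))) []).2.2) by
        simp [go2, h]]
      refine ⟨?_, h2, ?_⟩
      · rw [h1, slice_snoc B q k hq hqk hkB]
        simp
      · rw [h3, hget]

-- A rewritten through go2.
theorem portA_go2 (S B : List Int) (hlen : S.length ≤ B.length) :
    construct_black_edges S B = assemble (go2 (S.zip B) []) (B.drop S.length) := by
  have h1 : (PySem.List.pyRange 0 (S.length : Int) 1).foldl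
      (fun (st : List (List Int) × List Int × List Int) i =>
        if PySem.List.pyGetD S i 0 ≠ 0 then
          (st.1 ++ [st.2.2 ++ [PySem.List.pyGetD B i 0]],
           st.2.1 ++ [PySem.List.pyGetD S i 0], ([] : List Int))
        else (st.1, st.2.1, st.2.2 ++ [PySem.List.pyGetD B i 0]))
      ([], [], [])
      = (S.zip B).foldl stepA ([], [], []) := by
    have h := foldl_zip_idx
      (fun st num x =>
        if num ≠ 0 then (st.1 ++ [st.2.2 ++ [x]], st.2.1 ++ [num], ([] : List Int))
        else (st.1, st.2.1, st.2.2 ++ [x]))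
      S B hlen S.length 0 (by omega) (([], [], []) : List (List Int) × List Int × List Int)
    simp only [Nat.cast_zero, List.drop_zero] at h
    exact h
  have h2 : ∀ init : List Int,
      (PySem.List.pyRange (S.length : Int) (B.length : Int) 1).foldl
        (fun acc i => acc ++ [PySem.List.pyGetD B i 0]) init = init ++ B.drop S.length := by
    intro init
    have h := PySem.List.foldl_pyRange_pyGetD' B 0 (fun acc v => acc ++ [v]) init
      (a := (S.length : Int)) (by omega)
    rw [PySem.List.foldl_append_singleton_eq_self] at h
    simp only [Int.toNat_natCast] at h
    exact h
  simp only [construct_black_edges]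
  rw [h1, foldl_stepA_go2, h2]
  simp [assemble]

-- B rewritten through go2.
theorem portB_go2 (S B : List Int) (hlen : S.length ≤ B.length) :
    construct_black_edges_alt S B = assemble (go2 (S.zip B) []) (B.drop S.length) := by
  have hrec := genB S B hlen S.length 0 (by omega) (by omega) [] (-1) (by omega) (by omega)
  simp only at hrec
  rw [show ((-1 : Int) + 1) = 0 by norm_num] at hrec
  simp only [Nat.cast_zero, List.drop_zero] at hrec
  rw [show PySem.List.slice B (some 0) (some (0 : Int)) = [] by
    rw [PySem.List.slice_toNat B le_rfl le_rfl]; simp] at hrec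
  obtain ⟨h1, h2, h3⟩ := hrec
  simp only [construct_black_edges_alt]
  rw [h1, h2, h3]
  simp only [List.nil_append]
  unfold assemble
  by_cases hc : ((go2 (S.zip B) []).2.2 ++ B.drop S.length) = []
  · rw [if_neg (by simp [hc]), if_neg (by simp [hc])]
  · rw [if_pos hc, if_pos (List.length_pos_of_ne_nil hc)]

-- ===== VERDICT (by name: the statement is the Claim_ definition above) =====
theorem construct_black_edges_spec : Claim_equal_construct_black_edges := by
  intro S B _ hpre
  unfold Spec_construct_black_edges
  unfold Pre_construct_black_edges at hpre
  rw [portA_go2 S B hpre, portB_go2 S B hpre]
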